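-- pv_equiv track=rewrite | github.com/Tankel/Tic-Tac-Chec-Bot | testMat.py | check_four_numbers
-- ===== SOURCE A (Python) =====
-- def check_four_numbers(board, aremypieces):
--     target_numbers = {1, 2, 3, 4} if aremypieces else {-1, -2, -3, -4}
--
--     # Check horizontally
--     for row in board:
--         if set(row) - {0} == target_numbers:
--             return True
--
--     # Check vertically
--     for col in range(len(board[0])):
--         column_values = [board[row][col] for row in range(len(board))]
--         if set(column_values) - {0} == target_numbers:
--             return True
--
--     # Check diagonals
--     diagonal_values = [board[i][i] for i in range(len(board))]
--     if set(diagonal_values) - {0} == target_numbers: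
--         return True
--
--     reverse_diagonal_values = [board[i][len(board)-1-i] for i in range(len(board))]
--     if set(reverse_diagonal_values) - {0} == target_numbers:
--         return True
--
--     return False
-- ===== SOURCE B (Python) =====
-- def check_four_numbers(board, aremypieces):
--     # One pass over the rows with 5-bit piece masks: bit k-1 = target piece sign*k seen,
--     # bit 4 = some foreign nonzero piece seen.  A line wins iff its mask is exactly 0b1111.
--     sign = 1 if aremypieces else -1
--     n = len(board)
--     width = len(board[0])
--     FULL, BAD = 0b1111, 1 << 4
--
--     def bit(v):
--         if v == 0:
--             return 0
--         t = sign * v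
--         return 1 << (t - 1) if 1 <= t <= 4 else BAD
--
--     rows = []
--     cols = [0] * width
--     diag = 0
--     anti = 0
--     for i, row in enumerate(board):
--         rm = 0
--         for v in row:
--             rm |= bit(v)
--         rows.append(rm)
--         for j in range(width):
--             cols[j] |= bit(row[j])
--         diag |= bit(row[i])
--         anti |= bit(row[n - 1 - i])
--     return any(m == FULL for m in rows + cols + [diag, anti])
-- ===== Notes on version B (the rewrite author's own statement) =====
-- stated objective: alternative
-- what changed: B drops A's per-line set construction and set comparison entirely: a single loop over the rows accumulates a 5-bit bitmask per row, per column and per diagonal (bits 0-3 for the four target pieces, bit 4 for any foreign piece), and the board wins iff some accumulated mask equals 0b1111.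
-- outside the precondition, e.g. on check_four_numbers([[1, 2, 3, 4], [0]], True): A returns True, B raises IndexError
import Mathlib
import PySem

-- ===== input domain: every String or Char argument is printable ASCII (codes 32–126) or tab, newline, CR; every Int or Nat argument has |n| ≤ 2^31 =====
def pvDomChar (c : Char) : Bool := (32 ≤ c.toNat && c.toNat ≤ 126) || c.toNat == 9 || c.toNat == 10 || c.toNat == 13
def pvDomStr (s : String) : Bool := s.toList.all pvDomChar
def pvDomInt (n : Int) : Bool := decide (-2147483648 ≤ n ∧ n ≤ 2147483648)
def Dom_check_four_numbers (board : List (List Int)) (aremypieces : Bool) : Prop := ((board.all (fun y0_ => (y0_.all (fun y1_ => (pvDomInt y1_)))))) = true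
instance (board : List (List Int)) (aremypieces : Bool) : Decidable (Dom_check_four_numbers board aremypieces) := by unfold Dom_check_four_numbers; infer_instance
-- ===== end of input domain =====

-- B replaces A's set-based scans of rows, columns and diagonals by ONE pass over all cells
-- that accumulates a 5-bit piece mask per row, per column and per diagonal: objective 'alternative'.

-- ===== PORT A =====
-- set(line) - {0} == target   (A's per-line test)
def pvWin (target : PySem.Set Int) (line : List Int) : Bool :=
  PySem.Set.equal (PySem.Set.diff (PySem.Set.ofList line) (PySem.Set.ofList [0])) target

-- literal port of A; the pyGetD defaults are unreachable under Pre_check_four_numbers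
def check_four_numbers (board : List (List Int)) (aremypieces : Bool) : Bool :=
  let target : PySem.Set Int :=
    if aremypieces then PySem.Set.ofList [1, 2, 3, 4] else PySem.Set.ofList [-1, -2, -3, -4]
  -- Check horizontally
  if board.any (fun row => pvWin target row) then true
  -- Check vertically
  else if (PySem.List.pyRange 0 ((PySem.List.pyGetD board 0 []).length : Int) 1).any (fun col =>
      pvWin target ((PySem.List.pyRange 0 (board.length : Int) 1).map
        (fun row => PySem.List.pyGetD (PySem.List.pyGetD board row []) col 0))) then true
  -- Check diagonals
  else if pvWin target ((PySem.List.pyRange 0 (board.length : Int) 1).map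
      (fun i => PySem.List.pyGetD (PySem.List.pyGetD board i []) i 0)) then true
  else if pvWin target ((PySem.List.pyRange 0 (board.length : Int) 1).map
      (fun i => PySem.List.pyGetD (PySem.List.pyGetD board i []) ((board.length : Int) - 1 - i) 0)) then true
  else false

-- ===== PORT B =====
-- Source B: the bit contributed by one cell value (BAD = 16 marks a foreign nonzero piece)
def pvBit (s v : Int) : Nat :=
  if v == 0 then 0
  else if 1 ≤ s * v ∧ s * v ≤ 4 then 1 <<< (s * v - 1).toNat
  else 16

-- Source B loop body for one row (index p.2): row mask, column masks, diagonal masks.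
-- The getD defaults stand for Python's row[j]/row[i]/row[n-1-i], whose IndexError
-- cases are excluded by Pre_check_four_numbers (indices are nonnegative there).
def pvRowStep (n width : Nat) (s : Int)
    (st : List Nat × List Nat × Nat × Nat) (p : List Int × Nat) : List Nat × List Nat × Nat × Nat :=
  let rm := p.1.foldl (fun m v => m ||| pvBit s v) 0
  ( st.1 ++ [rm],
    (List.range width).foldl (fun c j => c.set j (c.getD j 0 ||| pvBit s (p.1.getD j 0))) st.2.1,
    st.2.2.1 ||| pvBit s (p.1.getD p.2 0),
    st.2.2.2 ||| pvBit s (p.1.getD (n - 1 - p.2) 0) )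

def check_four_numbers_alt (board : List (List Int)) (aremypieces : Bool) : Bool :=
  let s : Int := if aremypieces then 1 else -1
  let n := board.length
  let width := (PySem.List.pyGetD board 0 []).length
  let st := board.zipIdx.foldl (pvRowStep n width s) ([], List.replicate width 0, 0, 0)
  (st.1 ++ st.2.1 ++ [st.2.2.1, st.2.2.2]).any (fun m => m == 15)

-- ===== PRECONDITION & SPEC =====
-- Pre_ excludes empty and ragged/too-narrow boards on which A's index accesses raise
-- IndexError when its scans run to completion; on some of these A still returns True because
-- a winning line short-circuits before the bad access, and there B agrees or is free (see cites).
def Pre_check_four_numbers (board : List (List Int)) (aremypieces : Bool) : Prop :=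
  board ≠ [] ∧ ∀ i, (h : i < board.length) →
    board.headI.length ≤ board[i].length ∧ i < board[i].length ∧
    board.length - 1 - i < board[i].length
instance (board : List (List Int)) (aremypieces : Bool) : Decidable (Pre_check_four_numbers board aremypieces) := by unfold Pre_check_four_numbers; infer_instance

def pvWitness_check_four_numbers : List (List Int) × Bool := ([[1, 0], [0, 2]], true)

def Spec_check_four_numbers (board : List (List Int)) (aremypieces : Bool) (out : Bool) : Prop := out = check_four_numbers_alt board aremypieces
instance (board : List (List Int)) (aremypieces : Bool) (out : Bool) : Decidable (Spec_check_four_numbers board aremypieces out) := by unfold Spec_check_four_numbers; infer_instance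

-- ===== CLAIM (what is proved, stated in full; the proofs are below) =====
def Claim_equal_check_four_numbers : Prop := ∀ (board : List (List Int)) (aremypieces : Bool), Dom_check_four_numbers board aremypieces → Pre_check_four_numbers board aremypieces → Spec_check_four_numbers board aremypieces (check_four_numbers board aremypieces)

-- ===== LEMMAS AND PROOFS =====

-- the bitmask accumulated over a line, starting from a
def pvMaskFrom (s : Int) (a : Nat) (l : List Int) : Nat := l.foldl (fun m v => m ||| pvBit s v) a

lemma pvMaskFrom_cons (s : Int) (a : Nat) (v : Int) (l : List Int) :
    pvMaskFrom s a (v :: l) = pvMaskFrom s (a ||| pvBit s v) l := rfl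

lemma pvMaskFrom_testBit (s : Int) (l : List Int) (a : Nat) (b : Nat) :
    (pvMaskFrom s a l).testBit b = (a.testBit b || l.any (fun v => (pvBit s v).testBit b)) := by
  induction l generalizing a with
  | nil => simp [pvMaskFrom]
  | cons v t ih =>
    rw [pvMaskFrom_cons, ih, Nat.testBit_or]
    simp [Bool.or_assoc]

lemma pvBit_testBit (s v : Int) (b : Nat) :
    ((pvBit s v).testBit b = true) ↔
      (v ≠ 0 ∧ ((1 ≤ s * v ∧ s * v ≤ 4 ∧ b = (s * v - 1).toNat) ∨
                (¬(1 ≤ s * v ∧ s * v ≤ 4) ∧ b = 4))) := by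
  unfold pvBit
  split_ifs with h0 hr
  · simp at h0; simp [h0]
  · have : (1 : Nat) <<< (s * v - 1).toNat = 2 ^ (s * v - 1).toNat := by
      simp [Nat.shiftLeft_eq]
    rw [this, Nat.testBit_two_pow]
    simp at h0
    simp [h0, hr]
    tauto
  · have : (16 : Nat) = 2 ^ 4 := by norm_num
    rw [this, Nat.testBit_two_pow]
    simp at h0
    simp [h0, hr]
    tauto

lemma pv15_testBit (b : Nat) : (15 : Nat).testBit b = decide (b < 4) := by
  by_cases h : b < 4
  · interval_cases b <;> decide
  · have h2 : (15 : Nat) < 2 ^ b := by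
      calc (15 : Nat) < 2 ^ 4 := by norm_num
      _ ≤ 2 ^ b := Nat.pow_le_pow_right (by norm_num) (by omega)
    simp [Nat.testBit_lt_two_pow h2, h]

-- the heart of the equivalence: a line's mask is exactly 15 iff its nonzero values are
-- exactly the four target pieces
lemma pvMask_eq_fifteen_iff (s : Int) (hs : s = 1 ∨ s = -1) (l : List Int) :
    pvMaskFrom s 0 l = 15 ↔
      (∀ x : Int, (x ∈ l ∧ ¬x = 0) ↔ (x = s * 1 ∨ x = s * 2 ∨ x = s * 3 ∨ x = s * 4)) := by
  constructor
  · intro hm x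
    constructor
    · rintro ⟨hx, hx0⟩
      have hbad : (pvMaskFrom s 0 l).testBit 4 = false := by rw [hm]; simp [pv15_testBit]
      rw [pvMaskFrom_testBit] at hbad
      simp only [Nat.zero_testBit, Bool.false_or, List.any_eq_false] at hbad
      have := hbad x hx
      by_cases hr : 1 ≤ s * x ∧ s * x ≤ 4
      · rcases hs with rfl | rfl <;> omega
      · exfalso
        have : (pvBit s x).testBit 4 = true := (pvBit_testBit s x 4).mpr ⟨hx0, Or.inr ⟨hr, rfl⟩⟩
        exact absurd this (by simpa using hbad x hx)
    · intro hx
      have hx0 : ¬x = 0 := by rcases hs with rfl | rfl <;> omega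
      refine ⟨?_, hx0⟩
      -- bit (s*x - 1) is set in 15, hence some element of l produced it, and it must be x
      have hk : 1 ≤ s * x ∧ s * x ≤ 4 := by rcases hs with rfl | rfl <;> omega
      set b : Nat := (s * x - 1).toNat with hb
      have hb4 : b < 4 := by omega
      have hset : (pvMaskFrom s 0 l).testBit b = true := by rw [hm, pv15_testBit]; simp [hb4]
      rw [pvMaskFrom_testBit] at hset
      simp only [Nat.zero_testBit, Bool.false_or, List.any_eq_true] at hset
      obtain ⟨v, hv, hvb⟩ := hset
      rcases (pvBit_testBit s v b).mp hvb with ⟨hv0, h | h⟩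
      · have : s * v = s * x := by omega
        have : v = x := by rcases hs with rfl | rfl <;> omega
        exact this ▸ hv
      · omega
  · intro h
    apply Nat.eq_of_testBit_eq
    intro b
    rw [pvMaskFrom_testBit, pv15_testBit]
    simp only [Nat.zero_testBit, Bool.false_or]
    by_cases hb : b < 4
    · simp only [hb, decide_true, List.any_eq_true]
      refine ⟨s * (b + 1), ?_, ?_⟩
      · have : s * (b + 1) = s * 1 ∨ s * (b + 1) = s * 2 ∨ s * (b + 1) = s * 3 ∨ s * (b + 1) = s * 4 := by
          interval_cases b <;> simp
        exact ((h (s * (b + 1))).mpr this).1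
      · refine (pvBit_testBit s (s * (b + 1)) b).mpr ⟨?_, Or.inl ⟨?_, ?_, ?_⟩⟩ <;>
          rcases hs with rfl | rfl <;> omega
    · simp only [hb, decide_false, List.any_eq_false]
      intro v hv hvb
      rcases (pvBit_testBit s v b).mp hvb with ⟨hv0, hcase | hcase⟩
      · have := (h v).mp ⟨hv, hv0⟩
        rcases hs with rfl | rfl <;> omega
      · have := (h v).mp ⟨hv, hv0⟩
        have : 1 ≤ s * v ∧ s * v ≤ 4 := by rcases hs with rfl | rfl <;> omega
        exact hcase.1 this

-- A's per-line set test equals B's per-line mask test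
lemma pvWin_eq_mask (s : Int) (hs : s = 1 ∨ s = -1) (l : List Int) :
    pvWin (PySem.Set.ofList [s * 1, s * 2, s * 3, s * 4]) l = (pvMaskFrom s 0 l == 15) := by
  rw [Bool.eq_iff_iff, beq_iff_eq, pvMask_eq_fifteen_iff s hs l]
  unfold pvWin
  rw [PySem.Set.equal_iff]
  constructor
  · intro h x
    have := h x
    simp only [PySem.Set.mem_diff, PySem.Set.mem_ofList, List.mem_singleton] at this
    simpa using this
  · intro h x
    simp only [PySem.Set.mem_diff, PySem.Set.mem_ofList, List.mem_singleton]
    simpa using h x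

-- the column-update fold of one row, characterised pointwise
lemma pvColsFold (s : Int) (row : List Int) (w : Nat) :
    ∀ (c : List Nat), w ≤ c.length →
    (((List.range w).foldl (fun c j => c.set j (c.getD j 0 ||| pvBit s (row.getD j 0))) c).length
        = c.length) ∧
    (∀ j, ((List.range w).foldl (fun c j => c.set j (c.getD j 0 ||| pvBit s (row.getD j 0))) c).getD j 0
        = if j < w then c.getD j 0 ||| pvBit s (row.getD j 0) else c.getD j 0) := by
  induction w with
  | zero => intro c _; simp
  | succ w ih =>
    intro c hc
    rw [List.range_succ, List.foldl_append, List.foldl_cons, List.foldl_nil]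
    obtain ⟨ihl, ihg⟩ := ih c (by omega)
    refine ⟨by rw [List.length_set]; exact ihl, ?_⟩
    intro j
    by_cases hjw : j = w
    · subst hjw
      rw [List.getD_eq_getElem?_getD, List.getElem?_set_self (by omega), Option.getD_some,
          ihg j, if_neg (by omega), if_pos (by omega)]
    · rw [List.getD_eq_getElem?_getD, List.getElem?_set_ne (by omega),
          ← List.getD_eq_getElem?_getD, ihg j]
      by_cases hj : j < w
      · rw [if_pos hj, if_pos (by omega)]
      · rw [if_neg hj, if_neg (by omega)]

-- outer loop invariant: scanning the rows rs whose global indices start at i0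
lemma pvOuter_invariant (n width : Nat) (s : Int) (rs : List (List Int)) :
    ∀ (i0 : Nat) (rows cols : List Nat) (diag anti : Nat), cols.length = width →
    ((rs.zipIdx i0).foldl (pvRowStep n width s) (rows, cols, diag, anti)).1 =
      rows ++ rs.map (pvMaskFrom s 0) ∧
    ((rs.zipIdx i0).foldl (pvRowStep n width s) (rows, cols, diag, anti)).2.1.length = width ∧
    (∀ j, j < width →
      ((rs.zipIdx i0).foldl (pvRowStep n width s) (rows, cols, diag, anti)).2.1.getD j 0 =
        pvMaskFrom s (cols.getD j 0) (rs.map (fun r => r.getD j 0))) ∧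
    ((rs.zipIdx i0).foldl (pvRowStep n width s) (rows, cols, diag, anti)).2.2.1 =
      pvMaskFrom s diag ((rs.zipIdx i0).map (fun p => p.1.getD p.2 0)) ∧
    ((rs.zipIdx i0).foldl (pvRowStep n width s) (rows, cols, diag, anti)).2.2.2 =
      pvMaskFrom s anti ((rs.zipIdx i0).map (fun p => p.1.getD (n - 1 - p.2) 0)) := by
  induction rs with
  | nil =>
    intro i0 rows cols diag anti hlen
    simp [pvMaskFrom, hlen]
  | cons r rest ih =>
    intro i0 rows cols diag anti hlen
    rw [List.zipIdx_cons, List.foldl_cons]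
    obtain ⟨cl, cg⟩ := pvColsFold s r width cols (by omega)
    have hstep : pvRowStep n width s (rows, cols, diag, anti) (r, i0) =
        (rows ++ [pvMaskFrom s 0 r],
         (List.range width).foldl (fun c j => c.set j (c.getD j 0 ||| pvBit s (r.getD j 0))) cols,
         diag ||| pvBit s (r.getD i0 0),
         anti ||| pvBit s (r.getD (n - 1 - i0) 0)) := rfl
    rw [hstep]
    obtain ⟨k1, k2, k3, k4, k5⟩ := ih (i0 + 1) (rows ++ [pvMaskFrom s 0 r])
      ((List.range width).foldl (fun c j => c.set j (c.getD j 0 ||| pvBit s (r.getD j 0))) cols)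
      (diag ||| pvBit s (r.getD i0 0)) (anti ||| pvBit s (r.getD (n - 1 - i0) 0))
      (by rw [cl, hlen])
    refine ⟨?_, k2, ?_, ?_, ?_⟩
    · rw [k1]; simp
    · intro j hj
      rw [k3 j hj, cg j, if_pos hj]
      simp only [List.map_cons, pvMaskFrom_cons]
    · rw [k4]
      simp only [List.map_cons, pvMaskFrom_cons]
    · rw [k5]
      simp only [List.map_cons, pvMaskFrom_cons]

-- A's column line equals the getD-transpose column (reused from the A side)
lemma pvCol_eq (board : List (List Int)) (k : Nat) :
    (PySem.List.pyRange 0 (board.length : Int) 1).map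
      (fun row => PySem.List.pyGetD (PySem.List.pyGetD board row []) ((k : Int)) 0)
    = board.map (fun row => row.getD k 0) := by
  have h : (PySem.List.pyRange 0 (board.length : Int) 1).map
      (fun row => PySem.List.pyGetD board row []) = board :=
    PySem.List.map_pyGetD_pyRange_zero' board []
  calc (PySem.List.pyRange 0 (board.length : Int) 1).map
        (fun row => PySem.List.pyGetD (PySem.List.pyGetD board row []) ((k : Int)) 0)
      = ((PySem.List.pyRange 0 (board.length : Int) 1).map
          (fun row => PySem.List.pyGetD board row [])).map
          (fun r => PySem.List.pyGetD r ((k : Int)) 0) := by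
        rw [List.map_map]; rfl
    _ = board.map (fun r => PySem.List.pyGetD r ((k : Int)) 0) := by rw [h]
    _ = board.map (fun row => row.getD k 0) := by
        apply List.map_congr_left
        intro r _
        exact PySem.List.pyGetD_natCast r k 0

-- A's diagonal line, in Nat-index form
lemma pvDiagLine_eq (board : List (List Int)) :
    (PySem.List.pyRange 0 (board.length : Int) 1).map
      (fun i => PySem.List.pyGetD (PySem.List.pyGetD board i []) i 0)
    = board.zipIdx.map (fun p => p.1.getD p.2 0) := by
  rw [PySem.List.pyRange_one]
  simp only [Int.sub_zero, Int.toNat_natCast, List.map_map]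
  apply List.ext_getElem
  · simp
  · intro m h1 h2
    simp only [List.length_map, List.length_range] at h1
    simp only [List.getElem_map, List.getElem_range, List.getElem_zipIdx, Function.comp_apply,
      Nat.zero_add, Int.zero_add]
    rw [PySem.List.pyGetD_natCast, PySem.List.pyGetD_natCast,
        List.getD_eq_getElem _ _ h1]

-- A's reverse-diagonal line, in Nat-index form (uses every row index being < board.length)
lemma pvAntiLine_eq (board : List (List Int)) :
    (PySem.List.pyRange 0 (board.length : Int) 1).map
      (fun i => PySem.List.pyGetD (PySem.List.pyGetD board i []) ((board.length : Int) - 1 - i) 0)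
    = board.zipIdx.map (fun p => p.1.getD (board.length - 1 - p.2) 0) := by
  rw [PySem.List.pyRange_one]
  simp only [Int.sub_zero, Int.toNat_natCast, List.map_map]
  apply List.ext_getElem
  · simp
  · intro m h1 h2
    simp only [List.length_map, List.length_range] at h1
    simp only [List.getElem_map, List.getElem_range, List.getElem_zipIdx, Function.comp_apply,
      Nat.zero_add, Int.zero_add]
    rw [PySem.List.pyGetD_natCast]
    have hcast : (board.length : Int) - 1 - (m : Int) = ((board.length - 1 - m : Nat) : Int) := by
      omega
    rw [hcast, PySem.List.pyGetD_natCast, List.getD_eq_getElem _ _ h1]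

-- ===== VERDICT (by name: the statement is the Claim_ definition above) =====
theorem check_four_numbers_spec : Claim_equal_check_four_numbers := by
  intro board aremypieces _ hpre
  obtain ⟨hne, hall⟩ := hpre
  unfold Spec_check_four_numbers
  set s : Int := if aremypieces = true then 1 else -1 with hsdef
  have hs : s = 1 ∨ s = -1 := by rcases aremypieces <;> simp [hsdef]
  have htarget : (if aremypieces = true then PySem.Set.ofList ([1, 2, 3, 4] : List Int)
      else PySem.Set.ofList [-1, -2, -3, -4]) = PySem.Set.ofList [s * 1, s * 2, s * 3, s * 4] := by
    rcases aremypieces <;> norm_num [hsdef]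
  have hwidth : (PySem.List.pyGetD board 0 []).length = board.headI.length := by
    cases board with
    | nil => exact absurd rfl hne
    | cons x xs => simp [PySem.List.pyGetD_zero_cons]
  obtain ⟨g1, g2, g3, g4, g5⟩ :=
    pvOuter_invariant board.length board.headI.length s board 0 []
      (List.replicate board.headI.length 0) 0 0 (by simp)
  show check_four_numbers board aremypieces = check_four_numbers_alt board aremypieces
  simp only [check_four_numbers, check_four_numbers_alt]
  rw [← hsdef, htarget, hwidth, g1, g4, g5]
  simp only [List.nil_append, List.any_append, List.any_cons, List.any_nil, Bool.or_false,
    List.any_map]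
  -- rows
  have hrows : board.any (fun row => pvWin (PySem.Set.ofList [s * 1, s * 2, s * 3, s * 4]) row)
      = board.any (fun r => pvMaskFrom s 0 r == 15) := by
    exact List.any_congr rfl (fun r => pvWin_eq_mask s hs r)
  -- columns: B's final cols list is pointwise the column masks
  have hcolsB : (((board.zipIdx.foldl (pvRowStep board.length board.headI.length s)
        ([], List.replicate board.headI.length 0, 0, 0)).2.1).any (fun m => m == 15))
      = (List.range board.headI.length).any
          (fun j => pvMaskFrom s 0 (board.map (fun r => r.getD j 0)) == 15) := by
    have hlist : (board.zipIdx.foldl (pvRowStep board.length board.headI.length s)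
          ([], List.replicate board.headI.length 0, 0, 0)).2.1
        = (List.range board.headI.length).map
            (fun j => pvMaskFrom s 0 (board.map (fun r => r.getD j 0))) := by
      apply List.ext_getElem
      · simp [g2]
      · intro m h1 h2
        have hm : m < board.headI.length := by simpa [g2] using h1
        have h3 := g3 m hm
        rw [List.getD_eq_getElem _ _ (by simpa [g2] using hm),
            List.getD_eq_getElem?_getD, List.getElem?_replicate, if_pos hm] at h3
        simp only [Option.getD_some] at h3
        simp [h3]
    rw [hlist, List.any_map]
    exact List.any_congr rfl (fun j => rfl)
  have hcolsA : (PySem.List.pyRange 0 (board.headI.length : Int) 1).any (fun col =>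
        pvWin (PySem.Set.ofList [s * 1, s * 2, s * 3, s * 4])
          ((PySem.List.pyRange 0 (board.length : Int) 1).map
            (fun row => PySem.List.pyGetD (PySem.List.pyGetD board row []) col 0)))
      = (List.range board.headI.length).any
          (fun j => pvMaskFrom s 0 (board.map (fun r => r.getD j 0)) == 15) := by
    rw [PySem.List.pyRange_one]
    simp only [Int.sub_zero, Int.toNat_natCast, List.any_map]
    apply List.any_congr rfl
    intro k
    simp only [Int.zero_add, Function.comp_apply]
    rw [pvCol_eq board k, pvWin_eq_mask s hs]
  -- diagonals
  have hdiag : pvWin (PySem.Set.ofList [s * 1, s * 2, s * 3, s * 4])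
        ((PySem.List.pyRange 0 (board.length : Int) 1).map
          (fun i => PySem.List.pyGetD (PySem.List.pyGetD board i []) i 0))
      = (pvMaskFrom s 0 (board.zipIdx.map (fun p => p.1.getD p.2 0)) == 15) := by
    rw [pvDiagLine_eq, pvWin_eq_mask s hs]
  have hanti : pvWin (PySem.Set.ofList [s * 1, s * 2, s * 3, s * 4])
        ((PySem.List.pyRange 0 (board.length : Int) 1).map
          (fun i => PySem.List.pyGetD (PySem.List.pyGetD board i []) ((board.length : Int) - 1 - i) 0))
      = (pvMaskFrom s 0 (board.zipIdx.map (fun p => p.1.getD (board.length - 1 - p.2) 0)) == 15) := by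
    rw [pvAntiLine_eq, pvWin_eq_mask s hs]
  rw [hrows, hcolsA, hcolsB, hdiag, hanti]
  split_ifs <;> simp_all
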